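-- pv_equiv track=rewrite | github.com/zama-ai/hpu_fpga | sw/ntt/ntt_gf64_bsk_order.py | bsk_order
-- ===== SOURCE A (Python) =====
-- def bsk_order (cut_l):
--     """
--     Compute bsk output order for current working block size.
--     Extend to all the working blocks.
--     """
--
--     if (len(cut_l) == 1):
--         n_l = 2**cut_l[0]
--
--         return [i for i in range(n_l)]
--
--     else:
--         s_l = 0;
--         for c in (cut_l):
--           s_l = s_l + c
--
--         # Current WB size
--         n_l = 2**s_l
--
--         r0 = 2**cut_l[0]
--         r1 = 2**(s_l-cut_l[0])
--
--         r1_nb = n_l // r1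
--
--         l1 = bsk_order(cut_l[1:])
--
--         return [r0*idx+j for j in range(r1_nb) for idx in l1]
-- ===== SOURCE B (Python) =====
-- def bsk_order(cut_l):
--     """Iterative fold (innermost cut first) instead of recursion on the head cut."""
--     result = [i for i in range(2 ** cut_l[-1])]
--     for c in reversed(cut_l[:-1]):
--         r0 = 2 ** c
--         result = [r0 * idx + j for j in range(r0) for idx in result]
--     return result
-- ===== Notes on version B (the rewrite author's own statement) =====
-- stated objective: alternative
-- what changed: Replaces head-first recursion (with per-level re-summation of the cut list to recompute the block size) by a single iterative fold over the reversed cut list that maintains the accumulated permutation in a variable, using only 2**c per step.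
-- outside the precondition, e.g. on bsk_order([-1, 1]): A returns [], B raises TypeError; on bsk_order([]): A raises IndexError, B raises IndexError
import Mathlib
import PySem

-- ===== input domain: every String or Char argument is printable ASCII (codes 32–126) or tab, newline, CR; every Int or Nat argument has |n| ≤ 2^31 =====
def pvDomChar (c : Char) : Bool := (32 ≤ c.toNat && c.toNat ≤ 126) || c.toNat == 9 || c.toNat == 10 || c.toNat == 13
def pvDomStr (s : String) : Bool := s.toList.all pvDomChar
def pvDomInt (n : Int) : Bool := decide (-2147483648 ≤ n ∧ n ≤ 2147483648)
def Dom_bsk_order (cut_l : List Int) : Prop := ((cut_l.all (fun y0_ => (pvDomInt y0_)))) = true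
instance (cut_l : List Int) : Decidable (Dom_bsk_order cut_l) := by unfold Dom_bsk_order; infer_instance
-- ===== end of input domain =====

-- B replaces A's head-first recursion by an iterative fold over the reversed cut list (same cost, different decomposition).

-- ===== PORT A =====
-- Literal port of the recursion; 2**c is ported as (2:Int)^c.toNat, exact for c ≥ 0
-- (for negative c Python computes a float; those inputs are outside Pre_).
def bsk_order (cut_l : List Int) : List Int :=
  match cut_l with
  | [] => []          -- Python: cut_l[0] raises IndexError here (outside Pre_)
  | [c0] => PySem.List.pyRange 0 ((2:Int) ^ c0.toNat) 1
  | c0 :: c1 :: rest =>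
    let s_l := (c0 :: c1 :: rest).foldl (· + ·) 0
    let n_l := (2:Int) ^ s_l.toNat
    let r0 := (2:Int) ^ c0.toNat
    let r1 := (2:Int) ^ (s_l - c0).toNat
    let r1_nb := PySem.Int.floordiv n_l r1
    let l1 := bsk_order (c1 :: rest)
    (PySem.List.pyRange 0 r1_nb 1).flatMap (fun j => l1.map (fun idx => r0 * idx + j))

-- ===== PORT B =====
-- Literal port of Source B: result = list(range(2**cut_l[-1])); for c in reversed(cut_l[:-1]): ...
def bsk_order_alt (cut_l : List Int) : List Int :=
  match cut_l.getLast? with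
  | none => []        -- Python: cut_l[-1] raises IndexError here (outside Pre_)
  | some last =>
    ((PySem.List.slice cut_l none (some (-1))).reverse).foldl
      (fun result c =>
        let r0 := (2:Int) ^ c.toNat
        (PySem.List.pyRange 0 r0 1).flatMap (fun j => result.map (fun idx => r0 * idx + j)))
      (PySem.List.pyRange 0 ((2:Int) ^ last.toNat) 1)

-- ===== PRECONDITION & SPEC =====
-- Pre_ excludes the empty list, on which both raise IndexError, and lists containing a
-- negative cut, where Python's 2**c is a float: A either raises TypeError or returns []
-- from a floored zero-length range, while B always raises TypeError there.
def Pre_bsk_order (cut_l : List Int) : Prop := cut_l ≠ [] ∧ ∀ x ∈ cut_l, 0 ≤ x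
instance (cut_l : List Int) : Decidable (Pre_bsk_order cut_l) := by unfold Pre_bsk_order; infer_instance
def pvWitness_bsk_order : List Int := [1, 2, 1]

def Spec_bsk_order (cut_l : List Int) (out : List Int) : Prop := out = bsk_order_alt cut_l
instance (cut_l : List Int) (out : List Int) : Decidable (Spec_bsk_order cut_l out) := by unfold Spec_bsk_order; infer_instance

-- ===== CLAIM (what is proved, stated in full; the proofs are below) =====
def Claim_equal_bsk_order : Prop := ∀ (cut_l : List Int), Dom_bsk_order cut_l → Pre_bsk_order cut_l → Spec_bsk_order cut_l (bsk_order cut_l)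

-- ===== LEMMAS AND PROOFS =====

-- the common combine step: [r0*idx+j for j in range(r0) for idx in L] with r0 = 2^c
def pvCombine (c : Int) (L : List Int) : List Int :=
  (PySem.List.pyRange 0 ((2:Int) ^ c.toNat) 1).flatMap (fun j => L.map (fun idx => (2:Int) ^ c.toNat * idx + j))

lemma pow_floordiv_pow (a b : Nat) :
    PySem.Int.floordiv ((2:Int) ^ (a + b)) ((2:Int) ^ a) = (2:Int) ^ b := by
  rw [PySem.Int.floordiv_eq_ediv_of_pos (by positivity), pow_add, mul_comm]
  exact Int.mul_ediv_cancel _ (by positivity)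

lemma bsk_order_cons (c : Int) (l : List Int) (hne : l ≠ []) (hc : 0 ≤ c)
    (hnn : ∀ x ∈ l, 0 ≤ x) :
    bsk_order (c :: l) = pvCombine c (bsk_order l) := by
  obtain ⟨c1, rest, rfl⟩ := List.exists_cons_of_ne_nil hne
  show (let s_l := (c :: c1 :: rest).foldl (· + ·) 0
        let n_l := (2:Int) ^ s_l.toNat
        let r0 := (2:Int) ^ c.toNat
        let r1 := (2:Int) ^ (s_l - c).toNat
        let r1_nb := PySem.Int.floordiv n_l r1
        let l1 := bsk_order (c1 :: rest)
        (PySem.List.pyRange 0 r1_nb 1).flatMap (fun j => l1.map (fun idx => r0 * idx + j)))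
      = _
  have hsum : (c :: c1 :: rest).foldl (· + ·) 0 = (c :: c1 :: rest).sum := by
    simp [List.sum_eq_foldl]
  have hrest : 0 ≤ (c1 :: rest).sum :=
    List.sum_nonneg (by intro x hx; exact hnn x hx)
  have hs : (c :: c1 :: rest).sum = c + (c1 :: rest).sum := by simp
  have htn : (c + (c1 :: rest).sum).toNat = ((c1 :: rest).sum).toNat + c.toNat := by omega
  have hst : (c + (c1 :: rest).sum - c).toNat = ((c1 :: rest).sum).toNat := by omega
  simp only [hsum, hs, hst]
  rw [htn, pow_floordiv_pow]
  rfl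

lemma bsk_order_alt_cons (c : Int) (l : List Int) (hne : l ≠ []) :
    bsk_order_alt (c :: l) = pvCombine c (bsk_order_alt l) := by
  obtain ⟨c1, rest, rfl⟩ := List.exists_cons_of_ne_nil hne
  unfold bsk_order_alt
  rw [PySem.List.slice_to_neg_one, PySem.List.slice_to_neg_one]
  have hlast : (c :: c1 :: rest).getLast? = (c1 :: rest).getLast? := by
    simp [List.getLast?_cons_cons]
  rw [hlast]
  obtain ⟨last, hl⟩ : ∃ y, (c1 :: rest).getLast? = some y := by
    cases h : (c1 :: rest).getLast? with
    | none => simp at h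
    | some y => exact ⟨y, rfl⟩
  rw [hl]
  have hdl : (c :: c1 :: rest).dropLast = c :: (c1 :: rest).dropLast := by
    simp [List.dropLast_cons_of_ne_nil]
  rw [hdl, List.reverse_cons]
  simp only [List.foldl_append]
  rfl

lemma bsk_eq_of_pre : ∀ (l : List Int), l ≠ [] → (∀ x ∈ l, 0 ≤ x) →
    bsk_order l = bsk_order_alt l := by
  intro l
  induction l with
  | nil => intro h; exact absurd rfl h
  | cons c t ih =>
    intro _ hnn
    cases t with
    | nil => rfl
    | cons c1 rest =>
      have hne : (c1 :: rest) ≠ [] := by simp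
      have hnn' : ∀ x ∈ (c1 :: rest), 0 ≤ x := fun x hx => hnn x (List.mem_cons_of_mem _ hx)
      rw [bsk_order_cons c _ hne (hnn c (List.mem_cons_self)) hnn',
          bsk_order_alt_cons c _ hne, ih hne hnn']

-- ===== VERDICT (by name: the statement is the Claim_ definition above) =====
theorem bsk_order_spec : Claim_equal_bsk_order := by
  intro cut_l _ hpre
  unfold Spec_bsk_order
  exact bsk_eq_of_pre cut_l hpre.1 hpre.2
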